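-- pv_equiv track=rewrite | github.com/HandHui/BERT_ESIM | util.py | get_k_fold
-- ===== SOURCE A (Python) =====
-- def get_k_fold(length):      ####五折交叉验证的验证集区间
--     span = length//5
--     res = []
--     start = 0
--     for i in range(4):
--         res.append([start,start+span])
--         start = start+span
--     res.append([start,length])
--     return res
-- ===== SOURCE B (Python) =====
-- def get_k_fold(length):
--     span = length // 5
--     def build(i):
--         if i == 4:
--             return [[4 * span, length]]
--         return [[i * span, (i + 1) * span]] + build(i + 1)
--     return build(0)
-- ===== Notes on version B (the rewrite author's own statement) =====
-- stated objective: alternative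
-- what changed: B replaces the imperative loop threading a running start accumulator with a recursive builder that constructs the list of folds top-down from closed-form endpoints i*span and (i+1)*span, with the base case producing the final interval [4*span, length].
import Mathlib
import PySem

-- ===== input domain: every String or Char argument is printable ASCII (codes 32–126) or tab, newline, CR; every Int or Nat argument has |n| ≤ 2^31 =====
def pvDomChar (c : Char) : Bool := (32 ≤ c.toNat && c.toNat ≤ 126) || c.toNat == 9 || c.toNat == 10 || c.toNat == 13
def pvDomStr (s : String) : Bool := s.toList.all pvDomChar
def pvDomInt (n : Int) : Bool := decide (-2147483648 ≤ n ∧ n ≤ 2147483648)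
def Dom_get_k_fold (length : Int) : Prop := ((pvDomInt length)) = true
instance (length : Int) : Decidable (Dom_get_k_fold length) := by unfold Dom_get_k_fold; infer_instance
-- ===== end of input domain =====

-- B replaces A's loop with a threaded start accumulator by a recursive builder producing each
-- fold from closed-form endpoints i*span and (i+1)*span (alternative decomposition, same cost).

-- ===== PORT A =====
-- literal port: span = length//5; loop i in range(4) appending [start, start+span] and advancing start; final [start, length]
def get_k_fold (length : Int) : List (List Int) :=
  let span := PySem.Int.floordiv length 5
  let (res, start) :=
    (PySem.List.pyRange 0 4 1).foldl
      (fun (st : List (List Int) × Int) _ =>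
        (st.1 ++ [[st.2, st.2 + span]], st.2 + span))
      ([], 0)
  res ++ [[start, length]]

-- ===== PORT B =====
-- recursive builder from Source B; 'fuel' only makes the recursion total in Lean (the call uses fuel 5, enough for i = 0..4)
def get_k_fold_build (span length : Int) : Int → Nat → List (List Int)
  | _, 0 => []
  | i, fuel + 1 =>
    if i = 4 then [[4 * span, length]]
    else [[i * span, (i + 1) * span]] ++ get_k_fold_build span length (i + 1) fuel

def get_k_fold_alt (length : Int) : List (List Int) :=
  let span := PySem.Int.floordiv length 5
  get_k_fold_build span length 0 5

-- ===== PRECONDITION & SPEC =====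
def Spec_get_k_fold (length : Int) (out : List (List Int)) : Prop := out = get_k_fold_alt length
instance (length : Int) (out : List (List Int)) : Decidable (Spec_get_k_fold length out) := by unfold Spec_get_k_fold; infer_instance

-- ===== CLAIM (what is proved, stated in full; the proofs are below) =====
def Claim_equal_get_k_fold : Prop := ∀ (length : Int), Dom_get_k_fold length → Spec_get_k_fold length (get_k_fold length)

-- ===== LEMMAS AND PROOFS =====

-- ===== VERDICT (by name: the statement is the Claim_ definition above) =====
theorem get_k_fold_spec : Claim_equal_get_k_fold := by
  intro length _
  unfold Spec_get_k_fold get_k_fold get_k_fold_alt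
  simp [PySem.List.pyRange, List.range_succ, get_k_fold_build]
  and_intros <;> ring
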